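-- pv_equiv track=rewrite | github.com/anzeyimana/DeepKIN | deepkin/models/mamba_py_asr.py | compute_subsampling_output_sizes
-- ===== SOURCE A (Python) =====
-- import math
-- from typing import List, Tuple
--
-- def compute_subsampling_output_sizes(input_sizes: List[int]) -> List[int]:
--     kernel: int = 3
--     stride: int = 2
--     padding: int = 1
--     output_sizes: List[int] = []
--     for l in input_sizes:
--         l1 = int(math.floor(((l + (2 * padding) - (kernel - 1) - 1) / stride) + 1))
--         l2 = int(math.floor(((l1 + (2 * padding) - (kernel - 1) - 1) / stride) + 1))
--         output_sizes.append(l2)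
--     return output_sizes
-- ===== SOURCE B (Python) =====
-- from typing import List
--
-- def compute_subsampling_output_sizes(input_sizes: List[int]) -> List[int]:
--     # Two conv steps with kernel=3, stride=2, padding=1 collapse to ceil(l/4) = (l+3)//4.
--     return [(l + 3) // 4 for l in input_sizes]
-- ===== Notes on version B (the rewrite author's own statement) =====
-- stated objective: simpler
-- what changed: Replaces the two sequential float conv-size formula steps per element with the single exact closed-form integer division (l+3)//4 in one comprehension.
import Mathlib
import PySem

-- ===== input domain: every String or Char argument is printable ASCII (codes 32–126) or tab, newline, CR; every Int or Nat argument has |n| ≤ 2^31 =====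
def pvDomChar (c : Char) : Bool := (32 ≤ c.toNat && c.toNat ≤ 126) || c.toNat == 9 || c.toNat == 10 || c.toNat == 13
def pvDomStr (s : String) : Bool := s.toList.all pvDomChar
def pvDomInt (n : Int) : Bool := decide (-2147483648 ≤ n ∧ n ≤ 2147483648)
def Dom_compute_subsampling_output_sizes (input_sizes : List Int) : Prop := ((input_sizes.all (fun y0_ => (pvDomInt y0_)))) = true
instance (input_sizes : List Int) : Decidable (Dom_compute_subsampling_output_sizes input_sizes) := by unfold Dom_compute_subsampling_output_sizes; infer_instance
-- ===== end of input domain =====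

-- B replaces A's two per-element float conv-formula steps with the single closed form (l+3)//4 (simpler).

-- ===== PORT A =====
-- A's float division '/ stride' is exact on Dom (|l| ≤ 2^31 keeps the halved values exactly
-- representable in a double), so math.floor((x)/2) is ported exactly as PySem.Int.floordiv x 2.
def compute_subsampling_output_sizes (input_sizes : List Int) : List Int :=
  input_sizes.foldl (fun output_sizes l =>
    let l1 := PySem.Int.floordiv (l + (2 * 1) - (3 - 1) - 1) 2 + 1
    let l2 := PySem.Int.floordiv (l1 + (2 * 1) - (3 - 1) - 1) 2 + 1
    output_sizes ++ [l2]) []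

-- ===== PORT B =====
def compute_subsampling_output_sizes_alt (input_sizes : List Int) : List Int :=
  input_sizes.map (fun l => PySem.Int.floordiv (l + 3) 4)

-- ===== PRECONDITION & SPEC =====
def Spec_compute_subsampling_output_sizes (input_sizes : List Int) (out : List Int) : Prop := out = compute_subsampling_output_sizes_alt input_sizes
instance (input_sizes : List Int) (out : List Int) : Decidable (Spec_compute_subsampling_output_sizes input_sizes out) := by unfold Spec_compute_subsampling_output_sizes; infer_instance

-- ===== CLAIM (what is proved, stated in full; the proofs are below) =====
def Claim_equal_compute_subsampling_output_sizes : Prop := ∀ (input_sizes : List Int), Dom_compute_subsampling_output_sizes input_sizes → Spec_compute_subsampling_output_sizes input_sizes (compute_subsampling_output_sizes input_sizes)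

-- ===== LEMMAS AND PROOFS =====

-- per-element: the two nested floor steps equal the closed form
theorem pv_step_eq (l : Int) :
    PySem.Int.floordiv ((PySem.Int.floordiv (l + (2 * 1) - (3 - 1) - 1) 2 + 1) + (2 * 1) - (3 - 1) - 1) 2 + 1
      = PySem.Int.floordiv (l + 3) 4 := by
  rw [PySem.Int.floordiv_eq_ediv_of_pos (a := l + (2 * 1) - (3 - 1) - 1) (by norm_num),
      PySem.Int.floordiv_eq_ediv_of_pos (by norm_num),
      PySem.Int.floordiv_eq_ediv_of_pos (by norm_num)]
  omega

theorem pv_foldl_eq (input_sizes : List Int) (acc : List Int) :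
    input_sizes.foldl (fun output_sizes l =>
      let l1 := PySem.Int.floordiv (l + (2 * 1) - (3 - 1) - 1) 2 + 1
      let l2 := PySem.Int.floordiv (l1 + (2 * 1) - (3 - 1) - 1) 2 + 1
      output_sizes ++ [l2]) acc
    = acc ++ input_sizes.map (fun l => PySem.Int.floordiv (l + 3) 4) := by
  induction input_sizes generalizing acc with
  | nil => simp
  | cons x xs ih =>
    simp only [List.foldl, List.map]
    rw [ih, pv_step_eq x, List.append_assoc]
    rfl

-- ===== VERDICT (by name: the statement is the Claim_ definition above) =====
theorem compute_subsampling_output_sizes_spec : Claim_equal_compute_subsampling_output_sizes := by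
  intro input_sizes _
  unfold Spec_compute_subsampling_output_sizes compute_subsampling_output_sizes compute_subsampling_output_sizes_alt
  simpa using pv_foldl_eq input_sizes []
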